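-- pv_equiv track=rewrite | github.com/baddyscience/develop | algorithmTopic/超市里的货物架调整.py | solution
-- ===== SOURCE A (Python) =====
-- def solution(n: int, m: int, s: str, c: str) -> int:
--     demand = {}
--     for item in c:
--         if item in demand:
--             demand[item] += 1
--         else:
--             demand[item] = 1
--
--     sorted_s = sorted(s, key=lambda x: demand.get(x, 0), reverse=True)
--
--     sold = 0
--     for item in sorted_s:
--         if demand.get(item, 0) > 0:
--             sold += 1
--             demand[item] -= 1
--
--     return sold
-- ===== SOURCE B (Python) =====
-- def solution(n: int, m: int, s: str, c: str) -> int: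
--     ss = sorted(s)
--     cc = sorted(c)
--     i = j = 0
--     count = 0
--     while i < len(ss) and j < len(cc):
--         if ss[i] == cc[j]:
--             count += 1
--             i += 1
--             j += 1
--         elif ss[i] < cc[j]:
--             i += 1
--         else:
--             j += 1
--     return count
-- ===== Notes on version B (the rewrite author's own statement) =====
-- stated objective: alternative
-- what changed: Replaces A's demand-frequency dictionary and demand-keyed descending sort with a plain lexicographic sort of both strings followed by a two-pointer merge that counts the multiset-intersection size with just two cursors and a counter.
import Mathlib
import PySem

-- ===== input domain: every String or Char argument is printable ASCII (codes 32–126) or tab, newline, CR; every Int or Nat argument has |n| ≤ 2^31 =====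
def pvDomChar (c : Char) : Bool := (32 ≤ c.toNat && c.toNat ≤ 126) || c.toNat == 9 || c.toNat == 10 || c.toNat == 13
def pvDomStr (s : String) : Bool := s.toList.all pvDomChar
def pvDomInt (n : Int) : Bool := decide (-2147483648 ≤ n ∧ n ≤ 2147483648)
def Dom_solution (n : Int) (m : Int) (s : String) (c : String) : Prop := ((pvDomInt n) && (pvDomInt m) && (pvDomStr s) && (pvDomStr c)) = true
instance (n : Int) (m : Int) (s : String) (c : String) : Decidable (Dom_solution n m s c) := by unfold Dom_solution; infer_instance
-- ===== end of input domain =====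

-- B replaces A's demand-frequency dictionary and demand-keyed sort by a plain lexicographic
-- sort of both strings followed by a two-pointer merge counting common elements (objective: alternative).

-- ===== PORT A =====
-- literal port of A: build the demand counter over c, sort s by demand descending,
-- then scan, selling an item whenever its remaining demand is positive.
def solution (n : Int) (m : Int) (s : String) (c : String) : Int :=
  let demand : PySem.Dict Char Int :=
    c.toList.foldl
      (fun d item =>
        if d.contains item then d.modify item 0 (· + 1)
        else d.insert item 1)
      PySem.Dict.empty
  let sorted_s := PySem.List.sorted s.toList (fun x => demand.getD x 0) true
  let final :=
    sorted_s.foldl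
      (fun (st : Int × PySem.Dict Char Int) item =>
        if st.2.getD item 0 > 0 then (st.1 + 1, st.2.modify item 0 (· - 1))
        else st)
      (0, demand)
  final.1

-- ===== PORT B =====
-- two-pointer merge over the two sorted character lists (B's while-loop over indices i, j,
-- transcribed as the structural recursion on the two remaining suffixes)
def mergeCountB (ss cc : List Char) : Int :=
  match ss, cc with
  | a :: s', b :: c' =>
      if a = b then 1 + mergeCountB s' c'
      else if a < b then mergeCountB s' (b :: c')
      else mergeCountB (a :: s') c'
  | _, _ => 0
termination_by ss.length + cc.length
decreasing_by all_goals (simp [List.length_cons]; try omega)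

def solution_alt (n : Int) (m : Int) (s : String) (c : String) : Int :=
  let ss := PySem.List.sorted s.toList (fun x => x) false
  let cc := PySem.List.sorted c.toList (fun x => x) false
  mergeCountB ss cc

-- ===== PRECONDITION & SPEC =====
def Spec_solution (n : Int) (m : Int) (s : String) (c : String) (out : Int) : Prop := out = solution_alt n m s c
instance (n : Int) (m : Int) (s : String) (c : String) (out : Int) : Decidable (Spec_solution n m s c out) := by unfold Spec_solution; infer_instance

-- ===== CLAIM (what is proved, stated in full; the proofs are below) =====
def Claim_equal_solution : Prop := ∀ (n : Int) (m : Int) (s : String) (c : String), Dom_solution n m s c → Spec_solution n m s c (solution n m s c)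

-- ===== LEMMAS AND PROOFS =====

-- abstract matching count: greedily match each element of l against the multiset m
def matched : List Char → Multiset Char → Nat
  | [], _ => 0
  | a :: l, m => if a ∈ m then matched l (m.erase a) + 1 else matched l m

lemma matched_eq_card_inter (l : List Char) (m : Multiset Char) :
    matched l m = ((l : Multiset Char) ∩ m).card := by
  induction l generalizing m with
  | nil => simp [matched]
  | cons a l ih =>
    by_cases h : a ∈ m
    · rw [show ((a :: l : List Char) : Multiset Char) = a ::ₘ (l : Multiset Char) from rfl,
        Multiset.cons_inter_of_pos _ h]
      simp [matched, h, ih]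
    · rw [show ((a :: l : List Char) : Multiset Char) = a ::ₘ (l : Multiset Char) from rfl,
        Multiset.cons_inter_of_neg _ h]
      simp [matched, h, ih]

-- A's dict-building loop is the counter of c
lemma buildA_eq_counter (l : List Char) :
    l.foldl
      (fun d item =>
        if d.contains item then d.modify item 0 (· + 1)
        else d.insert item 1)
      PySem.Dict.empty = PySem.Dict.counter l := by
  rw [PySem.Dict.counter_eq_foldl]
  congr 1
  funext d item
  by_cases h : d.contains item = true
  · simp [h]
  · simp only [h, if_false]
    simp only [Bool.not_eq_true] at h
    simp [PySem.Dict.modify, PySem.Dict.getD_of_not_contains (d := d) (k := item) (h := h)]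

-- A's selling loop, run on any dict whose values are the counts of a multiset m,
-- adds exactly `matched l m` to the accumulator
lemma sellA_eq_matched (l : List Char) (m : Multiset Char) (sold : Int)
    (d : PySem.Dict Char Int) (hd : ∀ x, d.getD x 0 = (m.count x : Int)) :
    (l.foldl
      (fun (st : Int × PySem.Dict Char Int) item =>
        if st.2.getD item 0 > 0 then (st.1 + 1, st.2.modify item 0 (· - 1))
        else st)
      (sold, d)).1 = sold + (matched l m : Int) := by
  induction l generalizing m sold d with
  | nil => simp [matched]
  | cons a l ih =>
    by_cases h : a ∈ m
    · have hpos : d.getD a 0 > 0 := by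
        rw [hd a]; exact_mod_cast Multiset.count_pos.mpr h
      simp only [List.foldl_cons, hpos, if_pos]
      rw [ih (m := m.erase a) (sold := sold + 1) (d := d.modify a 0 (· - 1))
        (hd := by
          intro x
          rw [PySem.Dict.getD_modify]
          by_cases hx : x = a
          · subst hx
            rw [if_pos rfl, hd _, Multiset.count_erase_self]
            have := Multiset.count_pos.mpr h
            omega
          · rw [if_neg hx, hd x, Multiset.count_erase_of_ne hx])]
      simp [matched, h]
      ring
    · have hz : ¬ d.getD a 0 > 0 := by
        rw [hd a, Multiset.count_eq_zero_of_notMem h]; omega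
      simp only [List.foldl_cons, hz, if_neg, not_false_iff]
      rw [ih (m := m) (sold := sold) (d := d) (hd := hd)]
      simp [matched, h]

-- B's merge on two sorted lists counts the multiset intersection
lemma mergeCountB_eq_card_inter (ss cc : List Char)
    (hs : ss.Pairwise (· ≤ ·)) (hc : cc.Pairwise (· ≤ ·)) :
    mergeCountB ss cc = (((ss : Multiset Char) ∩ (cc : Multiset Char)).card : Int) := by
  induction ss generalizing cc with
  | nil => simp [mergeCountB]
  | cons a s' ihs =>
    induction cc with
    | nil => simp [mergeCountB]
    | cons b c' ihc =>
      rw [List.pairwise_cons] at hs hc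
      by_cases hab : a = b
      · subst hab
        rw [mergeCountB, if_pos rfl]
        rw [ihs c' hs.2 hc.2]
        rw [show ((a :: s' : List Char) : Multiset Char) = a ::ₘ (s' : Multiset Char) from rfl,
          show ((a :: c' : List Char) : Multiset Char) = a ::ₘ (c' : Multiset Char) from rfl,
          Multiset.cons_inter_of_pos _ (Multiset.mem_cons_self a _),
          Multiset.erase_cons_head]
        push_cast [Multiset.card_cons]
        ring
      · by_cases hlt : a < b
        · rw [mergeCountB, if_neg hab, if_pos hlt]
          rw [ihs (b :: c') hs.2 (List.pairwise_cons.mpr hc)]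
          have hna : a ∉ ((b :: c' : List Char) : Multiset Char) := by
            simp only [Multiset.mem_coe, List.mem_cons]
            rintro (rfl | hmem)
            · exact hab rfl
            · exact absurd (hc.1 a hmem) (not_le.mpr hlt)
          rw [show ((a :: s' : List Char) : Multiset Char) = a ::ₘ (s' : Multiset Char) from rfl,
            Multiset.cons_inter_of_neg _ hna]
        · have hbs : b ∉ ((a :: s' : List Char) : Multiset Char) := by
            have hba : b < a := lt_of_le_of_ne (not_lt.mp hlt) (fun e => hab e.symm)
            simp only [Multiset.mem_coe, List.mem_cons]
            rintro (rfl | hmem)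
            · exact hab rfl
            · exact absurd (hs.1 b hmem) (not_le.mpr hba)
          rw [mergeCountB, if_neg hab, if_neg hlt, ihc hc.2,
            show ((b :: c' : List Char) : Multiset Char) = b ::ₘ (c' : Multiset Char) from rfl,
            Multiset.inter_comm ((a :: s' : List Char) : Multiset Char) (b ::ₘ (c' : Multiset Char)),
            Multiset.cons_inter_of_neg _ hbs,
            Multiset.inter_comm ((c' : List Char) : Multiset Char) ((a :: s' : List Char) : Multiset Char)]

-- ===== VERDICT (by name: the statement is the Claim_ definition above) =====
theorem solution_spec : Claim_equal_solution := by
  intro n m s c _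
  unfold Spec_solution solution solution_alt
  rw [buildA_eq_counter]
  rw [sellA_eq_matched _ ((c.toList : Multiset Char)) 0 _
      (by intro x; rw [PySem.Dict.getD_counter]; simp)]
  rw [matched_eq_card_inter]
  rw [mergeCountB_eq_card_inter _ _
      (by simpa using PySem.List.sorted_pairwise s.toList (fun x => x))
      (by simpa using PySem.List.sorted_pairwise c.toList (fun x => x))]
  rw [Multiset.coe_eq_coe.mpr
      (PySem.List.sorted_perm s.toList (fun x => (PySem.Dict.counter c.toList).getD x 0) true),
    Multiset.coe_eq_coe.mpr (PySem.List.sorted_perm s.toList (fun x => x) false),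
    Multiset.coe_eq_coe.mpr (PySem.List.sorted_perm c.toList (fun x => x) false)]
  ring
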